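-- pv_equiv track=rewrite | github.com/Allen15763/spe_bank_recon | src/utils/duckdb_manager/migration/schema_diff.py | _types_compatible
-- ===== SOURCE A (Python) =====
-- def _types_compatible(type1: str, type2: str) -> bool:
--     """
--     檢查兩個類型是否相容
--
--     Args:
--         type1: 第一個類型
--         type2: 第二個類型
--
--     Returns:
--         bool: 是否相容
--     """
--     # 正規化類型名稱
--     type1 = type1.upper().strip()
--     type2 = type2.upper().strip()
--
--     # 完全相同
--     if type1 == type2:
--         return True
--
--     # 類型別名映射
--     type_aliases = {
--         'INT': ['INTEGER', 'INT4', 'SIGNED'],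
--         'BIGINT': ['INT8', 'LONG'],
--         'SMALLINT': ['INT2', 'SHORT'],
--         'TINYINT': ['INT1'],
--         'DOUBLE': ['FLOAT8', 'NUMERIC', 'DECIMAL'],
--         'REAL': ['FLOAT4', 'FLOAT'],
--         'VARCHAR': ['STRING', 'TEXT', 'CHAR', 'BPCHAR'],
--         'BOOLEAN': ['BOOL', 'LOGICAL'],
--         'TIMESTAMP': ['DATETIME', 'TIMESTAMP WITH TIME ZONE'],
--     }
--
--     for canonical, aliases in type_aliases.items():
--         all_types = [canonical] + aliases
--         if type1 in all_types and type2 in all_types: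
--             return True
--
--     return False
-- ===== SOURCE B (Python) =====
-- _TYPE_ALIASES = {
--     'INT': ['INTEGER', 'INT4', 'SIGNED'],
--     'BIGINT': ['INT8', 'LONG'],
--     'SMALLINT': ['INT2', 'SHORT'],
--     'TINYINT': ['INT1'],
--     'DOUBLE': ['FLOAT8', 'NUMERIC', 'DECIMAL'],
--     'REAL': ['FLOAT4', 'FLOAT'],
--     'VARCHAR': ['STRING', 'TEXT', 'CHAR', 'BPCHAR'],
--     'BOOLEAN': ['BOOL', 'LOGICAL'],
--     'TIMESTAMP': ['DATETIME', 'TIMESTAMP WITH TIME ZONE'],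
-- }
--
-- # Inverted index: every type name (canonical or alias) -> its group id, built once.
-- _TYPE_GROUP = {}
-- for _gid, (_canonical, _aliases) in enumerate(_TYPE_ALIASES.items()):
--     for _name in (_canonical, *_aliases):
--         _TYPE_GROUP[_name] = _gid
--
--
-- def _types_compatible(type1: str, type2: str) -> bool:
--     type1 = type1.upper().strip()
--     type2 = type2.upper().strip()
--     if type1 == type2:
--         return True
--     g1 = _TYPE_GROUP.get(type1)
--     return g1 is not None and g1 == _TYPE_GROUP.get(type2)
-- ===== Notes on version B (the rewrite author's own statement) =====
-- stated objective: simpler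
-- what changed: Replaces the per-call scan over all alias groups (membership-testing both names in each group list) with a single inverted dict from every type name to its group id built once at module load; the call then does the equality fast-path plus two constant-time lookups.
import Mathlib
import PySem

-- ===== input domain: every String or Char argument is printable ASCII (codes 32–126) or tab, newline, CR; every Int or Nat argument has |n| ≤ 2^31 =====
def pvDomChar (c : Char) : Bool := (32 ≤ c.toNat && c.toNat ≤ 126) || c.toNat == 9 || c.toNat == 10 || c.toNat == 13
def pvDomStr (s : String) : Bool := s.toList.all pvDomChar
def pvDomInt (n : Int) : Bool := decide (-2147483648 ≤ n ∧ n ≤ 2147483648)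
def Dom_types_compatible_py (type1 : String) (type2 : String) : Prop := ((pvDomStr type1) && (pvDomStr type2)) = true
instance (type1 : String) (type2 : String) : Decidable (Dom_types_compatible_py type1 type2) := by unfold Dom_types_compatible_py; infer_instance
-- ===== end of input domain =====

-- B replaces A's per-call scan over all alias groups with a single inverted
-- name→group-id index built once from the same table (objective: simpler call path).

-- The alias table both Python versions carry (dict of canonical → aliases, in source order).
def pvTypeAliases : List (String × List String) :=
  [("INT", ["INTEGER", "INT4", "SIGNED"]),
   ("BIGINT", ["INT8", "LONG"]),
   ("SMALLINT", ["INT2", "SHORT"]),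
   ("TINYINT", ["INT1"]),
   ("DOUBLE", ["FLOAT8", "NUMERIC", "DECIMAL"]),
   ("REAL", ["FLOAT4", "FLOAT"]),
   ("VARCHAR", ["STRING", "TEXT", "CHAR", "BPCHAR"]),
   ("BOOLEAN", ["BOOL", "LOGICAL"]),
   ("TIMESTAMP", ["DATETIME", "TIMESTAMP WITH TIME ZONE"])]

-- ===== PORT A =====
-- A: normalize, equality fast path, then scan each group testing membership of both names.
def types_compatible_py (type1 : String) (type2 : String) : Bool :=
  let t1 := PySem.Str.strip (PySem.Str.upper type1)
  let t2 := PySem.Str.strip (PySem.Str.upper type2)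
  if t1 == t2 then true
  else pvTypeAliases.any (fun p => (p.1 :: p.2).contains t1 && (p.1 :: p.2).contains t2)

-- ===== PORT B =====
-- the dict-building loop of Source B: every name of group #i maps to i (first match = dict, names distinct)
def pvBuildIdx : List (String × List String) → Nat → List (String × Nat)
  | [], _ => []
  | (c, al) :: rest, i => (c :: al).map (fun n => (n, i)) ++ pvBuildIdx rest (i + 1)

def pvTypeGroup : List (String × Nat) := pvBuildIdx pvTypeAliases 0

-- dict.get(name): first-match lookup in the association list
def pvLookup (s : String) (idx : List (String × Nat)) : Option Nat :=
  (idx.find? (fun p => p.1 == s)).map (·.2)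

-- "g1 is not None and g1 == _TYPE_GROUP.get(type2)"
def pvSameGroup : Option Nat → Option Nat → Bool
  | some a, some b => a == b
  | _, _ => false

def types_compatible_py_alt (type1 : String) (type2 : String) : Bool :=
  let t1 := PySem.Str.strip (PySem.Str.upper type1)
  let t2 := PySem.Str.strip (PySem.Str.upper type2)
  if t1 == t2 then true
  else pvSameGroup (pvLookup t1 pvTypeGroup) (pvLookup t2 pvTypeGroup)

-- ===== PRECONDITION & SPEC =====
def Spec_types_compatible_py (type1 : String) (type2 : String) (out : Bool) : Prop := out = types_compatible_py_alt type1 type2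
instance (type1 : String) (type2 : String) (out : Bool) : Decidable (Spec_types_compatible_py type1 type2 out) := by unfold Spec_types_compatible_py; infer_instance

-- ===== CLAIM (what is proved, stated in full; the proofs are below) =====
def Claim_equal_types_compatible_py : Prop := ∀ (type1 : String) (type2 : String), Dom_types_compatible_py type1 type2 → Spec_types_compatible_py type1 type2 (types_compatible_py type1 type2)

-- ===== LEMMAS AND PROOFS =====

theorem pvLookup_cons (c : String) (al : List String) (rest : List (String × List String))
    (i : Nat) (s : String) :
    pvLookup s (pvBuildIdx ((c, al) :: rest) i) =
      if s ∈ c :: al then some i else pvLookup s (pvBuildIdx rest (i + 1)) := by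
  simp only [pvLookup, pvBuildIdx, List.find?_append, List.find?_map]
  cases hf : List.find? ((fun p => p.1 == s) ∘ fun n => (n, i)) (c :: al) with
  | none =>
      rw [if_neg]
      · simp
      · intro hs
        have := List.find?_eq_none.mp hf s hs
        simp at this
  | some x =>
      have hx : x ∈ c :: al := List.mem_of_find?_eq_some hf
      have hxs : x = s := by
        have := List.find?_some hf
        simpa using this
      rw [if_pos (hxs ▸ hx)]
      simp

theorem pvLookup_ge (gs : List (String × List String)) (s : String) :
    ∀ (i j : Nat), pvLookup s (pvBuildIdx gs i) = some j → i ≤ j := by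
  induction gs with
  | nil => intro i j h; simp [pvLookup, pvBuildIdx] at h
  | cons p rest ih =>
      intro i j h
      obtain ⟨c, al⟩ := p
      rw [pvLookup_cons] at h
      split at h
      · simp at h; omega
      · have := ih (i + 1) j h; omega

theorem pvAny_false_left (gs : List (String × List String)) (s t : String)
    (hs : ∀ p ∈ gs, s ∉ p.1 :: p.2) :
    gs.any (fun p => (p.1 :: p.2).contains s && (p.1 :: p.2).contains t) = false := by
  simp only [List.any_eq_false, Bool.and_eq_true, not_and, List.contains_eq_mem,
    decide_eq_true_eq]
  intro p hp hmem
  exact absurd hmem (hs p hp)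

theorem pvAny_false_right (gs : List (String × List String)) (s t : String)
    (ht : ∀ p ∈ gs, t ∉ p.1 :: p.2) :
    gs.any (fun p => (p.1 :: p.2).contains s && (p.1 :: p.2).contains t) = false := by
  simp only [List.any_eq_false, Bool.and_eq_true, not_and, List.contains_eq_mem,
    decide_eq_true_eq]
  intro p hp _ hmem
  exact absurd hmem (ht p hp)

theorem pvKey (gs : List (String × List String)) (s t : String) :
    ∀ i : Nat, (gs.flatMap (fun p => p.1 :: p.2)).Nodup →
    gs.any (fun p => (p.1 :: p.2).contains s && (p.1 :: p.2).contains t) =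
      pvSameGroup (pvLookup s (pvBuildIdx gs i)) (pvLookup t (pvBuildIdx gs i)) := by
  induction gs with
  | nil => intro i _; simp [pvLookup, pvBuildIdx, pvSameGroup]
  | cons p rest ih =>
      intro i hnd
      obtain ⟨c, al⟩ := p
      have hnd' : ((c :: al) ++ rest.flatMap (fun p => p.1 :: p.2)).Nodup := by
        simpa [List.flatMap_cons] using hnd
      have hsplit := List.nodup_append.mp hnd'
      have hrest_nd : (rest.flatMap (fun p => p.1 :: p.2)).Nodup := hsplit.2.1
      have hnotin : ∀ x, x ∈ c :: al → ∀ q ∈ rest, x ∉ q.1 :: q.2 := by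
        intro x hx q hq hxq
        exact hsplit.2.2 x hx x (List.mem_flatMap.mpr ⟨q, hq, hxq⟩) rfl
      rw [pvLookup_cons, pvLookup_cons]
      by_cases hs : s ∈ c :: al <;> by_cases ht : t ∈ c :: al
      · rw [if_pos hs, if_pos ht]
        have h1 : (c :: al).contains s = true := List.elem_eq_true_of_mem hs
        have h2 : (c :: al).contains t = true := List.elem_eq_true_of_mem ht
        simp [List.any_cons, pvSameGroup]
        exact Or.inl ⟨by simpa using hs, by simpa using ht⟩
      · -- s in the head group, t not: head conjunct false, rest cannot contain s
        rw [if_pos hs, if_neg ht]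
        have h2 : (c :: al).contains t = false := by simp [List.contains_eq_mem, ht]
        rw [List.any_cons]
        simp only [h2, Bool.and_false, Bool.false_or]
        rw [pvAny_false_left rest s t (hnotin s hs)]
        cases hlt : pvLookup t (pvBuildIdx rest (i + 1)) with
        | none => rfl
        | some b =>
            have hb := pvLookup_ge rest t (i + 1) b hlt
            have hne : (i == b) = false := by simp only [beq_eq_false_iff_ne]; omega
            simp [pvSameGroup, hne]
      · -- t in the head group, s not
        rw [if_neg hs, if_pos ht]
        have h1 : (c :: al).contains s = false := by simp [List.contains_eq_mem, hs]
        rw [List.any_cons]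
        simp only [h1, Bool.false_and, Bool.false_or]
        rw [pvAny_false_right rest s t (hnotin t ht)]
        cases hls : pvLookup s (pvBuildIdx rest (i + 1)) with
        | none => rfl
        | some a =>
            have ha := pvLookup_ge rest s (i + 1) a hls
            have hne : (a == i) = false := by simp only [beq_eq_false_iff_ne]; omega
            simp [pvSameGroup, hne]
      · rw [if_neg hs, if_neg ht]
        have h1 : (c :: al).contains s = false := by simp [List.contains_eq_mem, hs]
        rw [List.any_cons]
        simp only [h1, Bool.false_and, Bool.false_or]
        exact ih (i + 1) hrest_nd

set_option maxHeartbeats 1000000 in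
theorem pvTableNodup : (pvTypeAliases.flatMap (fun p => p.1 :: p.2)).Nodup := by decide

-- ===== VERDICT (by name: the statement is the Claim_ definition above) =====
theorem pvTypeGroup_eq : pvTypeGroup = pvBuildIdx pvTypeAliases 0 := rfl

theorem types_compatible_py_spec : Claim_equal_types_compatible_py := by
  intro type1 type2 _
  show types_compatible_py type1 type2 = types_compatible_py_alt type1 type2
  unfold types_compatible_py types_compatible_py_alt
  by_cases h : (PySem.Str.strip (PySem.Str.upper type1) ==
      PySem.Str.strip (PySem.Str.upper type2)) = true
  · rw [if_pos h, if_pos h]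
  · rw [if_neg h, if_neg h, pvTypeGroup_eq]
    exact pvKey pvTypeAliases _ _ 0 pvTableNodup
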